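-- pv_equiv track=rewrite | github.com/haichuanlyu/MASC599_PolymerProject | Polymer Project/Archive/find_possible_chemical_group.py | first_paren_is_right
-- ===== SOURCE A (Python) =====
-- def first_paren_is_right(sth):
--     k = 0
--     while k < len(sth):
--         if sth[k] == ')':
--             return True
--         if sth[k] == '(':
--             return False
--         k += 1
--     return False
-- ===== SOURCE B (Python) =====
-- def first_paren_is_right(sth):
--     i = sth.find('(')
--     j = sth.find(')')
--     return j != -1 and (i == -1 or j < i)
-- ===== Notes on version B (the rewrite author's own statement) =====
-- stated objective: simpler
-- what changed: Replaces the indexed while-loop with early returns by two str.find scans and a single positional comparison of the first open-paren and close-paren occurrences.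
import Mathlib
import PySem

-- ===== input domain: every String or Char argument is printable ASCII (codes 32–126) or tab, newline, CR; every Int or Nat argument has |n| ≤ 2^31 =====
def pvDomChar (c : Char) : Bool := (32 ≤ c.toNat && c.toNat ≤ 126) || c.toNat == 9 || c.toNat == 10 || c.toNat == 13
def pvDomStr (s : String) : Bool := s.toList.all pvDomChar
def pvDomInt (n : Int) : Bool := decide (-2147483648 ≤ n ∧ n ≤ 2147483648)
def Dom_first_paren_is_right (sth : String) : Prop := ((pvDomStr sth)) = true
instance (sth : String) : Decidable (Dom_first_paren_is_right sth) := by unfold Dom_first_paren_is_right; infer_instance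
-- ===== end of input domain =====

-- B replaces A's indexed while-loop with two first-occurrence scans (str.find) and one positional comparison (objective: simpler).


-- ===== PORT A =====
-- A's while-loop over index k, transliterated as structural recursion over the characters in order.
def firstParenLoop : List Char → Bool
  | [] => false
  | c :: rest =>
    if c = ')' then true
    else if c = '(' then false
    else firstParenLoop rest

def first_paren_is_right (sth : String) : Bool := firstParenLoop sth.toList

-- ===== PORT B =====
def first_paren_is_right_alt (sth : String) : Bool :=
  let i := PySem.Str.find sth "("
  let j := PySem.Str.find sth ")"
  decide (j ≠ -1) && (decide (i = -1) || decide (j < i))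

-- ===== PRECONDITION & SPEC =====
def Spec_first_paren_is_right (sth : String) (out : Bool) : Prop := out = first_paren_is_right_alt sth
instance (sth : String) (out : Bool) : Decidable (Spec_first_paren_is_right sth out) := by unfold Spec_first_paren_is_right; infer_instance

-- ===== CLAIM (what is proved, stated in full; the proofs are below) =====
def Claim_equal_first_paren_is_right : Prop := ∀ (sth : String), Dom_first_paren_is_right sth → Spec_first_paren_is_right sth (first_paren_is_right sth)

-- ===== LEMMAS AND PROOFS =====

lemma find_go_nil (sub : List Char) (k : Nat) :
    PySem.Chars.find.go sub [] k = if sub.isEmpty then (k : Int) else -1 := rfl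

lemma find_go_cons (sub : List Char) (c : Char) (t : List Char) (k : Nat) :
    PySem.Chars.find.go sub (c :: t) k =
      if sub.isPrefixOf (c :: t) then (k : Int) else PySem.Chars.find.go sub t (k + 1) := rfl

lemma find_go_shift (x : Char) (l : List Char) (k : Nat) :
    PySem.Chars.find.go [x] l k =
      if PySem.Chars.find.go [x] l 0 = -1 then -1 else PySem.Chars.find.go [x] l 0 + k := by
  induction l generalizing k with
  | nil => simp [find_go_nil]
  | cons c t ih =>
    by_cases h : ([x].isPrefixOf (c :: t) : Bool)
    · simp [find_go_cons, h]
    · rw [find_go_cons, find_go_cons, if_neg h, if_neg h, ih (k + 1), ih 1]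
      by_cases h0 : PySem.Chars.find.go [x] t 0 = -1
      · simp [h0]
      · simp only [h0, if_false]
        have : ¬ (PySem.Chars.find.go [x] t 0 + (1 : Nat) = -1) := by
          have := PySem.Chars.neg_one_le_find (s := t) (sub := [x])
          simp only [PySem.Chars.find] at this
          push_cast
          omega
        simp only [this, if_false]
        push_cast
        ring

lemma find_cons (x c : Char) (t : List Char) :
    PySem.Chars.find (c :: t) [x] =
      if x = c then 0
      else if PySem.Chars.find t [x] = -1 then -1 else PySem.Chars.find t [x] + 1 := by
  simp only [PySem.Chars.find, find_go_cons]
  by_cases h : x = c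
  · subst h
    simp [List.isPrefixOf]
  · have hp : ([x].isPrefixOf (c :: t) : Bool) = false := by
      simp [List.isPrefixOf, h]
    rw [hp]
    simp only [Bool.false_eq_true, if_false, if_neg h]
    rw [find_go_shift x t 1]
    push_cast
    rfl

lemma find_nonneg_or (l : List Char) (x : Char) :
    PySem.Chars.find l [x] = -1 ∨ 0 ≤ PySem.Chars.find l [x] := by
  have := PySem.Chars.neg_one_le_find (s := l) (sub := [x])
  omega

lemma loop_eq_find (l : List Char) :
    firstParenLoop l =
      (decide (PySem.Chars.find l [')'] ≠ -1) &&
        (decide (PySem.Chars.find l ['('] = -1) ||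
          decide (PySem.Chars.find l [')'] < PySem.Chars.find l ['(']))) := by
  induction l with
  | nil => simp [firstParenLoop, PySem.Chars.find, find_go_nil]
  | cons c t ih =>
    rw [firstParenLoop, find_cons, find_cons]
    by_cases hr : c = ')'
    · subst hr
      have hi := find_nonneg_or t '('
      rcases hi with hi | hi <;> simp_all <;> omega
    · by_cases hl : c = '('
      · subst hl
        have hj := find_nonneg_or t ')'
        rcases hj with hj | hj <;> simp_all <;> omega
      · have h1 : ¬ (')' = c) := fun h => hr h.symm
        have h2 : ¬ ('(' = c) := fun h => hl h.symm
        rw [if_neg hr, if_neg hl, if_neg h1, if_neg h2, ih]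
        have hi := find_nonneg_or t '('
        have hj := find_nonneg_or t ')'
        rcases hi with hi | hi <;> rcases hj with hj | hj
        · simp [hi, hj]
        · have hb : ¬ PySem.Chars.find t [')'] = -1 := by omega
          have hb1 : ¬ PySem.Chars.find t [')'] + 1 = -1 := by omega
          simp [hi, hb, hb1]
        · simp [hj]
        · have ha : ¬ PySem.Chars.find t ['('] = -1 := by omega
          have hb : ¬ PySem.Chars.find t [')'] = -1 := by omega
          have ha1 : ¬ PySem.Chars.find t ['('] + 1 = -1 := by omega
          have hb1 : ¬ PySem.Chars.find t [')'] + 1 = -1 := by omega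
          have hlt : (PySem.Chars.find t [')'] + 1 < PySem.Chars.find t ['('] + 1) =
              (PySem.Chars.find t [')'] < PySem.Chars.find t ['(']) := by
            apply propext; omega
          simp [ha, hb, ha1, hb1, hlt]

-- ===== VERDICT (by name: the statement is the Claim_ definition above) =====
theorem first_paren_is_right_spec : Claim_equal_first_paren_is_right := by
  intro sth _
  unfold Spec_first_paren_is_right first_paren_is_right first_paren_is_right_alt
  rw [loop_eq_find]
  simp [PySem.Str.find_eq]
  rfl
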